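-- pv_equiv track=rewrite | github.com/Drlordbasil/groq-gmail-assistant | main.py | clean_email_body
-- ===== SOURCE A (Python) =====
-- def clean_email_body(email_body):
--     lines = email_body.split("\n")
--     cleaned_lines = []
--     capture = False
--
--     for line in lines:
--         # Check if the line contains any common email header starts
--         if "From:" in line or "Sent:" in line or "To:" in line or "Subject:" in line:
--             # When we encounter one of these headers after starting to capture, we stop.
--             if capture:
--                 break
--             continue
--         # Check if the line is a reply line or too short, indicating a header or break in content
--         if line.strip().startswith(">") or len(line.strip()) == 0:
--             continue
--         # Start capturing after the first non-header, non-reply line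
--         capture = True
--         if capture:
--             cleaned_lines.append(line)
--
--     return "\n".join(cleaned_lines).strip()
-- ===== SOURCE B (Python) =====
-- def _label(line):
--     """0 = content, 1 = blank/quoted reply, 2 = header marker."""
--     if "From:" in line or "Sent:" in line or "To:" in line or "Subject:" in line:
--         return 2
--     s = line.strip()
--     if s.startswith(">") or not s:
--         return 1
--     return 0
--
--
-- def clean_email_body(email_body):
--     # Classify every line once, then work with index arithmetic on the label table:
--     # the kept region runs from the first content line to the next header line.
--     lines = email_body.split("\n")
--     labels = [_label(l) for l in lines]
--     if 0 not in labels: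
--         return ""
--     start = labels.index(0)
--     seg_labels = labels[start:]
--     end = seg_labels.index(2) if 2 in seg_labels else len(seg_labels)
--     segment = lines[start:start + end]
--     kept = [l for l in segment if _label(l) == 0]
--     return "\n".join(kept).strip()
-- ===== Notes on version B (the rewrite author's own statement) =====
-- stated objective: alternative
-- what changed: Replaces A's stateful flagged loop (capture flag, break/continue) with a label table built in one classification pass, then pure index arithmetic: the first content index and the next header index delimit a slice, from which non-content lines are filtered.
import Mathlib
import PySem

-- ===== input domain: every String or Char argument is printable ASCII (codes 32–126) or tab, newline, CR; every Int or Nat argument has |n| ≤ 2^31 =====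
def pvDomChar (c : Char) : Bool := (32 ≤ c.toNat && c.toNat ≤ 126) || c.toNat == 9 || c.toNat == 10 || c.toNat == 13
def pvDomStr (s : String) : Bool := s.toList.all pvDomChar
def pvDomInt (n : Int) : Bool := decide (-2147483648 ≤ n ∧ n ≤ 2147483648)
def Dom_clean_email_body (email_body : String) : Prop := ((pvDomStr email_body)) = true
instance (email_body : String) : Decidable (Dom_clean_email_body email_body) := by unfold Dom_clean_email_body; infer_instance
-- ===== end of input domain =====

-- B replaces A's stateful flagged loop with a label table plus index arithmetic (objective: alternative, same cost).

-- ===== PORT A =====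
-- A's single loop: state = (accumulated lines, capture flag); a header line after capture started breaks.
def cleanLoopA : List String → List String → Bool → List String
  | [], acc, _ => acc
  | l :: rest, acc, capture =>
    if PySem.Str.isIn "From:" l || PySem.Str.isIn "Sent:" l || PySem.Str.isIn "To:" l || PySem.Str.isIn "Subject:" l then
      if capture then acc else cleanLoopA rest acc capture
    else if PySem.Str.startswith (PySem.Str.strip l) ">" || PySem.Str.len (PySem.Str.strip l) == 0 then
      cleanLoopA rest acc capture
    else
      cleanLoopA rest (acc ++ [l]) true

def clean_email_body (email_body : String) : String :=
  let lines := (PySem.Str.split? email_body "\n").getD []   -- split? is some: the separator "\n" is nonempty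
  PySem.Str.strip (PySem.Str.join "\n" (cleanLoopA lines [] false))

-- ===== PORT B =====
-- _label: 0 = content, 1 = blank/quoted reply, 2 = header marker
def pvLabel (line : String) : Int :=
  if PySem.Str.isIn "From:" line || PySem.Str.isIn "Sent:" line || PySem.Str.isIn "To:" line || PySem.Str.isIn "Subject:" line then 2
  else
    let s := PySem.Str.strip line
    if PySem.Str.startswith s ">" || PySem.Str.len s == 0 then 1
    else 0

def clean_email_body_alt (email_body : String) : String :=
  let lines := (PySem.Str.split? email_body "\n").getD []   -- split? is some: the separator "\n" is nonempty
  let labels := lines.map pvLabel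
  if !(labels.contains 0) then ""                           -- '0 not in labels'
  else
    let start := (PySem.List.index? labels 0).getD 0        -- labels.index(0); present by the guard above
    let seg_labels := PySem.List.slice labels (some (start : Int)) none
    let endIdx := if seg_labels.contains 2 then (PySem.List.index? seg_labels 2).getD 0 else seg_labels.length
    let segment := PySem.List.slice lines (some (start : Int)) (some ((start : Int) + (endIdx : Int)))
    let kept := segment.filter (fun l => pvLabel l == 0)
    PySem.Str.strip (PySem.Str.join "\n" kept)

-- ===== PRECONDITION & SPEC =====
def Spec_clean_email_body (email_body : String) (out : String) : Prop := out = clean_email_body_alt email_body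
instance (email_body : String) (out : String) : Decidable (Spec_clean_email_body email_body out) := by unfold Spec_clean_email_body; infer_instance

-- ===== CLAIM (what is proved, stated in full; the proofs are below) =====
def Claim_equal_clean_email_body : Prop := ∀ (email_body : String), Dom_clean_email_body email_body → Spec_clean_email_body email_body (clean_email_body email_body)

-- ===== LEMMAS AND PROOFS =====
-- Shorthands used only by the proofs.
def pvHdr (l : String) : Bool :=
  PySem.Str.isIn "From:" l || PySem.Str.isIn "Sent:" l || PySem.Str.isIn "To:" l || PySem.Str.isIn "Subject:" l

def pvSkip (l : String) : Bool :=
  PySem.Str.startswith (PySem.Str.strip l) ">" || PySem.Str.len (PySem.Str.strip l) == 0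

-- A's captured region, characterised: drop the leading header/skippable lines, take up to the next header, drop skippables.
def pvAcore (ls : List String) : List String :=
  (((ls.dropWhile (fun l => pvHdr l || pvSkip l)).takeWhile (fun l => !pvHdr l)).filter (fun l => !pvSkip l))

theorem pvLabel_eq (l : String) : pvLabel l = if pvHdr l then 2 else if pvSkip l then 1 else 0 := rfl

theorem cleanLoopA_cons (l : String) (rest acc : List String) (capture : Bool) :
    cleanLoopA (l :: rest) acc capture =
      if pvHdr l then (if capture then acc else cleanLoopA rest acc capture)
      else if pvSkip l then cleanLoopA rest acc capture
      else cleanLoopA rest (acc ++ [l]) true := rfl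

theorem cleanLoopA_true (ls : List String) : ∀ acc : List String,
    cleanLoopA ls acc true = acc ++ (ls.takeWhile (fun l => !pvHdr l)).filter (fun l => !pvSkip l) := by
  induction ls with
  | nil => intro acc; simp [cleanLoopA]
  | cons l rest ih =>
    intro acc
    rw [cleanLoopA_cons]
    by_cases hh : pvHdr l = true
    · simp [hh]
    · rw [Bool.not_eq_true] at hh
      by_cases hs : pvSkip l = true
      · simp [hh, hs, ih]
      · rw [Bool.not_eq_true] at hs
        simp [hh, hs, ih]

theorem cleanLoopA_false (ls : List String) : cleanLoopA ls [] false = pvAcore ls := by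
  induction ls with
  | nil => simp [cleanLoopA, pvAcore]
  | cons l rest ih =>
    rw [cleanLoopA_cons]
    by_cases hh : pvHdr l = true
    · simp [pvAcore, hh, ih]
    · rw [Bool.not_eq_true] at hh
      by_cases hs : pvSkip l = true
      · simp [pvAcore, hh, hs, ih]
      · rw [Bool.not_eq_true] at hs
        simp [pvAcore, hh, hs, cleanLoopA_true]

-- B's segment computation, as a pure list function (the kept lines).
def pvBkept (ls : List String) : List String :=
  let labels := ls.map pvLabel
  if !(labels.contains 0) then []
  else
    let start := (PySem.List.index? labels 0).getD 0
    let seg_labels := PySem.List.slice labels (some (start : Int)) none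
    let endIdx := if seg_labels.contains 2 then (PySem.List.index? seg_labels 2).getD 0 else seg_labels.length
    let segment := PySem.List.slice ls (some (start : Int)) (some ((start : Int) + (endIdx : Int)))
    segment.filter (fun l => pvLabel l == 0)

-- Taking up to the first label-2 index is takeWhile (not header).
theorem pv_take_end (ls : List String) :
    ls.take (if (ls.map pvLabel).contains 2 then (PySem.List.index? (ls.map pvLabel) 2).getD 0 else (ls.map pvLabel).length)
      = ls.takeWhile (fun l => !pvHdr l) := by
  induction ls with
  | nil => simp
  | cons l rest ih =>
    simp only [List.map_cons]
    by_cases hh : pvHdr l = true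
    · have h2 : pvLabel l = 2 := by rw [pvLabel_eq, hh]; simp
      rw [h2, PySem.List.index?_cons_self]
      simp [hh]
    · rw [Bool.not_eq_true] at hh
      have h2 : pvLabel l ≠ 2 := by
        rw [pvLabel_eq, hh]; by_cases hs : pvSkip l = true <;> simp [hs]
      have h2' : ¬ ((2 : Int) = pvLabel l) := fun h => h2 h.symm
      rw [PySem.List.index?_cons_of_ne _ h2]
      by_cases hc : (rest.map pvLabel).contains 2 = true
      · have hmem : ∃ a ∈ rest, pvLabel a = 2 := by simpa using hc
        obtain ⟨k, hk⟩ := Option.isSome_iff_exists.mp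
          ((PySem.List.index?_isSome_iff _ _).mpr (List.mem_map.mpr hmem))
        rw [hk] at ih ⊢
        simp only [hc, if_true, Option.getD_some] at ih
        simp [hmem, List.take_succ_cons, hh, ih]
      · have hn : PySem.List.index? (rest.map pvLabel) 2 = none :=
          (PySem.List.index?_eq_none_iff _ _).mpr (by simpa using hc)
        have hnmem : ¬ ∃ a ∈ rest, pvLabel a = 2 := by simpa using hc
        rw [hn] at ih ⊢
        have ih' : rest = List.takeWhile (fun l => !pvHdr l) rest := by
          simpa [hnmem] using ih
        simp [h2', hnmem, hh, List.take_succ_cons, ← ih']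

-- Inside a header-free region, "label = 0" is exactly "not skippable".
theorem pv_filter_region (ls : List String) :
    (ls.takeWhile (fun l => !pvHdr l)).filter (fun l => pvLabel l == 0)
      = (ls.takeWhile (fun l => !pvHdr l)).filter (fun l => !pvSkip l) := by
  apply List.filter_congr
  intro l hl
  have hh : pvHdr l = false := by
    have := List.mem_takeWhile_imp hl
    simpa using this
  rw [pvLabel_eq, hh]
  by_cases hs : pvSkip l = true <;> simp [hs]

-- Dropping the head shifts B's slices by one.
theorem pv_slice_from_succ_int (x : Int) (xs : List Int) (s : Nat) :
    PySem.List.slice (x :: xs) (some ((s + 1 : Nat) : Int)) none = PySem.List.slice xs (some ((s : Nat) : Int)) none := by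
  rw [PySem.List.slice_from_natCast, PySem.List.slice_from_natCast, List.drop_succ_cons]

theorem pv_slice_seg_succ (x : String) (xs : List String) (s e : Nat) :
    PySem.List.slice (x :: xs) (some ((s + 1 : Nat) : Int)) (some (((s + 1 : Nat) : Int) + (e : Nat)))
      = PySem.List.slice xs (some ((s : Nat) : Int)) (some (((s : Nat) : Int) + (e : Nat))) := by
  rw [PySem.List.slice_natCast_add, PySem.List.slice_natCast_add, List.drop_succ_cons]

-- Main bridge: B's index/slice computation yields exactly A's captured region.
theorem pvBkept_eq_Acore (ls : List String) : pvBkept ls = pvAcore ls := by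
  induction ls with
  | nil => simp [pvBkept, pvAcore]
  | cons l rest ih =>
    by_cases h0 : pvLabel l = 0
    · -- first content line is at index 0: start = 0, segment = take endIdx
      have hh : pvHdr l = false := by
        rw [pvLabel_eq] at h0
        by_cases hh : pvHdr l = true
        · rw [hh] at h0; simp at h0
        · exact Bool.not_eq_true _ |>.mp hh
      have hs : pvSkip l = false := by
        rw [pvLabel_eq, hh] at h0
        by_cases hs : pvSkip l = true
        · rw [hs] at h0; simp at h0
        · exact Bool.not_eq_true _ |>.mp hs
      have hidx : PySem.List.index? ((l :: rest).map pvLabel) 0 = some 0 := by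
        simpa [h0] using PySem.List.index?_cons_self (0 : Int) (rest.map pvLabel)
      have hc0 : (((l :: rest).map pvLabel).contains 0) = true := by
        simp [h0]
      rw [pvBkept]
      simp only [hc0, Bool.not_true, if_neg (by simp : ¬ (false = true)), hidx, Option.getD_some,
        Nat.cast_zero, PySem.List.slice_zero_start, PySem.List.slice_none_none, zero_add,
        PySem.List.slice_to_natCast]
      rw [pv_take_end, pv_filter_region]
      unfold pvAcore
      rw [List.dropWhile_cons_of_neg (by simp [hh, hs])]
    · -- non-content head: both sides ignore l
      have hA : pvAcore (l :: rest) = pvAcore rest := by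
        unfold pvAcore
        rw [List.dropWhile_cons_of_pos]
        rw [pvLabel_eq] at h0
        by_cases hh : pvHdr l = true
        · simp [hh]
        · rw [Bool.not_eq_true] at hh
          rw [hh] at h0
          by_cases hs : pvSkip l = true
          · simp [hs]
          · rw [Bool.not_eq_true] at hs
            rw [hs] at h0; simp at h0
      rw [hA, ← ih]
      by_cases hc : (rest.map pvLabel).contains 0 = true
      · have hmem : ∃ a ∈ rest, pvLabel a = 0 := by simpa using hc
        obtain ⟨s, hsome⟩ := Option.isSome_iff_exists.mp
          ((PySem.List.index?_isSome_iff _ _).mpr (List.mem_map.mpr hmem))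
        have hc' : (((l :: rest).map pvLabel).contains 0) = true := by
          simp only [List.map_cons, List.contains_cons, Bool.or_eq_true]
          right; simpa using List.mem_map.mpr hmem
        have hidx : PySem.List.index? ((l :: rest).map pvLabel) 0 = some (s + 1) := by
          rw [List.map_cons, PySem.List.index?_cons_of_ne _ h0, hsome]; rfl
        rw [pvBkept, pvBkept]
        simp only [hc, hc', hidx, hsome, Bool.not_true,
          if_neg (by simp : ¬ (false = true)), Option.getD_some]
        rw [List.map_cons, pv_slice_from_succ_int, pv_slice_seg_succ]
      · have h0' : ¬ ((0 : Int) = pvLabel l) := fun h => h0 h.symm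
        have hall : ∀ x ∈ rest, ¬ pvLabel x = 0 := by simpa using hc
        rw [pvBkept, pvBkept]
        simp [h0']
        rw [if_pos hall, if_pos hall]

-- ===== VERDICT (by name: the statement is the Claim_ definition above) =====
theorem clean_email_body_spec : Claim_equal_clean_email_body := by
  intro email_body _
  show clean_email_body email_body = clean_email_body_alt email_body
  simp only [clean_email_body, clean_email_body_alt, cleanLoopA_false, ← pvBkept_eq_Acore]
  rw [pvBkept]
  by_cases hc : ((((PySem.Str.split? email_body "\n").getD []).map pvLabel).contains 0) = true
  · rw [if_neg (by simpa using hc), if_neg (by simpa using hc)]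
  · rw [if_pos (by simpa using hc), if_pos (by simpa using hc)]
    rfl
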